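-- pv_equiv track=rewrite | github.com/manichandana8/DineSmartAI | app/services/reservation_time_slots.py | detect_venue_kind
-- ===== SOURCE A (Python) =====
-- from typing import Any, Dict, List, Optional, Sequence, Tuple
--
-- def detect_venue_kind(types: Sequence[str], venue_name: str = "") -> str:
--     """Map Google Places types (+ name hints) to a default-hours bucket."""
--     tset = {str(x).lower() for x in types if x}
--     nm = (venue_name or "").lower()
--     if any(k in nm for k in ("boba", "bubble tea", "tapioca", "pearl milk")):
--         return "boba_shop"
--     if "lodging" in tset:
--         return "hotel_dining"
--     if tset & {"bar", "night_club", "wine_bar", "lounge"}: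
--         return "bar_lounge"
--     if "bakery" in tset:
--         return "bakery"
--     if tset & {"dessert_shop", "ice_cream_shop", "confectionery"}:
--         return "dessert_shop"
--     if tset & {"cafe", "coffee_shop", "tea_house"}:
--         return "cafe"
--     if "bubble_tea_store" in tset:
--         return "boba_shop"
--     if tset & {
--         "restaurant",
--         "meal_takeaway",
--         "meal_delivery",
--         "brunch_restaurant",
--         "fine_dining_restaurant",
--         "fast_food_restaurant",
--         "food",
--     }:
--         return "restaurant"
--     return "restaurant"
-- ===== SOURCE B (Python) =====
-- _PRIORITY = {
--     "lodging": (1, "hotel_dining"),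
--     "bar": (2, "bar_lounge"),
--     "night_club": (2, "bar_lounge"),
--     "wine_bar": (2, "bar_lounge"),
--     "lounge": (2, "bar_lounge"),
--     "bakery": (3, "bakery"),
--     "dessert_shop": (4, "dessert_shop"),
--     "ice_cream_shop": (4, "dessert_shop"),
--     "confectionery": (4, "dessert_shop"),
--     "cafe": (5, "cafe"),
--     "coffee_shop": (5, "cafe"),
--     "tea_house": (5, "cafe"),
--     "bubble_tea_store": (6, "boba_shop"),
-- }
--
-- def detect_venue_kind(types, venue_name=""):
--     nm = (venue_name or "").lower()
--     if any(k in nm for k in ("boba", "bubble tea", "tapioca", "pearl milk")):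
--         return "boba_shop"
--     best = (7, "restaurant")
--     for t in types:
--         if t:
--             p = _PRIORITY.get(str(t).lower())
--             if p is not None and p[0] < best[0]:
--                 best = p
--     return best[1]
-- ===== Notes on version B (the rewrite author's own statement) =====
-- stated objective: alternative
-- what changed: Replaced the chain of seven sequential set-membership ifs by a single pass over the types list selecting the minimum-rank entry of a precomputed type->(priority,kind) table.
import Mathlib
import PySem

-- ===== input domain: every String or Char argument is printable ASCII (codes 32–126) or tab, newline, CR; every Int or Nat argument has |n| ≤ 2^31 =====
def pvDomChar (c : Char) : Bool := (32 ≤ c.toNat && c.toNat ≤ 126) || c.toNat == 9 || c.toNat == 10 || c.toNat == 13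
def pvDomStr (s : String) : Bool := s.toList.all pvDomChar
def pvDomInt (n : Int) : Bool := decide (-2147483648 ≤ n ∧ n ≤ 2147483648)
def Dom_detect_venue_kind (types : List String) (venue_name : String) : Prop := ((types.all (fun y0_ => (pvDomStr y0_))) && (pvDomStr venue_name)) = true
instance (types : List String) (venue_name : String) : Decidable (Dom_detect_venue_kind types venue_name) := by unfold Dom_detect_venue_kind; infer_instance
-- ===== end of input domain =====

-- B replaces A's chain of sequential set-membership ifs by one pass over the types list
-- selecting the minimum-priority entry of a precomputed type -> (priority, kind) table (objective: alternative).

-- ===== PORT A =====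
def detect_venue_kind (types : List String) (venue_name : String) : String :=
  let tset : PySem.Set String :=
    PySem.Set.ofList ((types.filter (fun x => x ≠ "")).map (fun x => PySem.Str.lower x))
  let nm := PySem.Str.lower (if venue_name = "" then "" else venue_name)
  if ["boba", "bubble tea", "tapioca", "pearl milk"].any (fun k => PySem.Str.isIn k nm) then
    "boba_shop"
  else if PySem.Set.contains tset "lodging" then "hotel_dining"
  else if PySem.Set.inter tset (PySem.Set.ofList ["bar", "night_club", "wine_bar", "lounge"]) ≠ [] then "bar_lounge"
  else if PySem.Set.contains tset "bakery" then "bakery"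
  else if PySem.Set.inter tset (PySem.Set.ofList ["dessert_shop", "ice_cream_shop", "confectionery"]) ≠ [] then "dessert_shop"
  else if PySem.Set.inter tset (PySem.Set.ofList ["cafe", "coffee_shop", "tea_house"]) ≠ [] then "cafe"
  else if PySem.Set.contains tset "bubble_tea_store" then "boba_shop"
  else if PySem.Set.inter tset (PySem.Set.ofList ["restaurant", "meal_takeaway", "meal_delivery", "brunch_restaurant", "fine_dining_restaurant", "fast_food_restaurant", "food"]) ≠ [] then "restaurant"
  else "restaurant"

-- ===== PORT B =====
def pvPriority : PySem.Dict String (Nat × String) :=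
  PySem.Dict.ofList
    [ ("lodging", (1, "hotel_dining"))
    , ("bar", (2, "bar_lounge")), ("night_club", (2, "bar_lounge"))
    , ("wine_bar", (2, "bar_lounge")), ("lounge", (2, "bar_lounge"))
    , ("bakery", (3, "bakery"))
    , ("dessert_shop", (4, "dessert_shop")), ("ice_cream_shop", (4, "dessert_shop"))
    , ("confectionery", (4, "dessert_shop"))
    , ("cafe", (5, "cafe")), ("coffee_shop", (5, "cafe")), ("tea_house", (5, "cafe"))
    , ("bubble_tea_store", (6, "boba_shop")) ]

def detect_venue_kind_alt (types : List String) (venue_name : String) : String :=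
  let nm := PySem.Str.lower (if venue_name = "" then "" else venue_name)
  if ["boba", "bubble tea", "tapioca", "pearl milk"].any (fun k => PySem.Str.isIn k nm) then
    "boba_shop"
  else
    (types.foldl (fun best t =>
      if t ≠ "" then
        match PySem.Dict.get? pvPriority (PySem.Str.lower t) with
        | some p => if p.1 < best.1 then p else best
        | none => best
      else best) ((7 : Nat), "restaurant")).2

-- ===== PRECONDITION & SPEC =====
def Spec_detect_venue_kind (types : List String) (venue_name : String) (out : String) : Prop := out = detect_venue_kind_alt types venue_name
instance (types : List String) (venue_name : String) (out : String) : Decidable (Spec_detect_venue_kind types venue_name out) := by unfold Spec_detect_venue_kind; infer_instance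

-- ===== CLAIM (what is proved, stated in full; the proofs are below) =====
def Claim_equal_detect_venue_kind : Prop := ∀ (types : List String) (venue_name : String), Dom_detect_venue_kind types venue_name → Spec_detect_venue_kind types venue_name (detect_venue_kind types venue_name)

-- ===== LEMMAS AND PROOFS =====

-- the priority rank of a (not yet lowered) type string; 7 = no table entry
def rk (t : String) : Nat :=
  match PySem.Dict.get? pvPriority (PySem.Str.lower t) with
  | some p => p.1
  | none => 7

-- the venue kind returned for a given minimal rank
def kindOf (r : Nat) : String :=
  if r = 1 then "hotel_dining" else if r = 2 then "bar_lounge" else if r = 3 then "bakery"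
  else if r = 4 then "dessert_shop" else if r = 5 then "cafe" else if r = 6 then "boba_shop"
  else "restaurant"

-- minimal rank of a list of type strings, starting from init a
def mfold (a : Nat) (ts : List String) : Nat := ts.foldl (fun m t => min m (rk t)) a

theorem pvPriority_items : pvPriority =
    ⟨[ ("lodging", (1, "hotel_dining"))
     , ("bar", (2, "bar_lounge")), ("night_club", (2, "bar_lounge"))
     , ("wine_bar", (2, "bar_lounge")), ("lounge", (2, "bar_lounge"))
     , ("bakery", (3, "bakery"))
     , ("dessert_shop", (4, "dessert_shop")), ("ice_cream_shop", (4, "dessert_shop"))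
     , ("confectionery", (4, "dessert_shop"))
     , ("cafe", (5, "cafe")), ("coffee_shop", (5, "cafe")), ("tea_house", (5, "cafe"))
     , ("bubble_tea_store", (6, "boba_shop")) ]⟩ := by rfl

theorem get?_pvPriority (s : String) : PySem.Dict.get? pvPriority s =
    if s = "lodging" then some (1, "hotel_dining")
    else if s = "bar" then some (2, "bar_lounge")
    else if s = "night_club" then some (2, "bar_lounge")
    else if s = "wine_bar" then some (2, "bar_lounge")
    else if s = "lounge" then some (2, "bar_lounge")
    else if s = "bakery" then some (3, "bakery")
    else if s = "dessert_shop" then some (4, "dessert_shop")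
    else if s = "ice_cream_shop" then some (4, "dessert_shop")
    else if s = "confectionery" then some (4, "dessert_shop")
    else if s = "cafe" then some (5, "cafe")
    else if s = "coffee_shop" then some (5, "cafe")
    else if s = "tea_house" then some (5, "cafe")
    else if s = "bubble_tea_store" then some (6, "boba_shop")
    else none := by
  rw [pvPriority_items]
  simp only [PySem.Dict.get?, List.find?_cons]
  by_cases h0 : s = "lodging"
  · subst h0; simp
  rw [if_neg h0]
  simp only [beq_eq_false_iff_ne.mpr (Ne.symm h0)]
  by_cases h1 : s = "bar"
  · subst h1; simp
  rw [if_neg h1]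
  simp only [beq_eq_false_iff_ne.mpr (Ne.symm h1)]
  by_cases h2 : s = "night_club"
  · subst h2; simp
  rw [if_neg h2]
  simp only [beq_eq_false_iff_ne.mpr (Ne.symm h2)]
  by_cases h3 : s = "wine_bar"
  · subst h3; simp
  rw [if_neg h3]
  simp only [beq_eq_false_iff_ne.mpr (Ne.symm h3)]
  by_cases h4 : s = "lounge"
  · subst h4; simp
  rw [if_neg h4]
  simp only [beq_eq_false_iff_ne.mpr (Ne.symm h4)]
  by_cases h5 : s = "bakery"
  · subst h5; simp
  rw [if_neg h5]
  simp only [beq_eq_false_iff_ne.mpr (Ne.symm h5)]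
  by_cases h6 : s = "dessert_shop"
  · subst h6; simp
  rw [if_neg h6]
  simp only [beq_eq_false_iff_ne.mpr (Ne.symm h6)]
  by_cases h7 : s = "ice_cream_shop"
  · subst h7; simp
  rw [if_neg h7]
  simp only [beq_eq_false_iff_ne.mpr (Ne.symm h7)]
  by_cases h8 : s = "confectionery"
  · subst h8; simp
  rw [if_neg h8]
  simp only [beq_eq_false_iff_ne.mpr (Ne.symm h8)]
  by_cases h9 : s = "cafe"
  · subst h9; simp
  rw [if_neg h9]
  simp only [beq_eq_false_iff_ne.mpr (Ne.symm h9)]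
  by_cases h10 : s = "coffee_shop"
  · subst h10; simp
  rw [if_neg h10]
  simp only [beq_eq_false_iff_ne.mpr (Ne.symm h10)]
  by_cases h11 : s = "tea_house"
  · subst h11; simp
  rw [if_neg h11]
  simp only [beq_eq_false_iff_ne.mpr (Ne.symm h11)]
  by_cases h12 : s = "bubble_tea_store"
  · subst h12; simp
  rw [if_neg h12]
  simp only [beq_eq_false_iff_ne.mpr (Ne.symm h12)]
  rfl

theorem lookup_char (s : String) (p : Nat × String)
    (h : PySem.Dict.get? pvPriority s = some p) :
    p.2 = kindOf p.1 ∧ 1 ≤ p.1 ∧ p.1 ≤ 6 := by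
  rw [get?_pvPriority] at h
  by_cases h0 : s = "lodging"
  · rw [if_pos h0] at h; cases h; exact ⟨by decide, by decide, by decide⟩
  rw [if_neg h0] at h
  by_cases h1 : s = "bar"
  · rw [if_pos h1] at h; cases h; exact ⟨by decide, by decide, by decide⟩
  rw [if_neg h1] at h
  by_cases h2 : s = "night_club"
  · rw [if_pos h2] at h; cases h; exact ⟨by decide, by decide, by decide⟩
  rw [if_neg h2] at h
  by_cases h3 : s = "wine_bar"
  · rw [if_pos h3] at h; cases h; exact ⟨by decide, by decide, by decide⟩
  rw [if_neg h3] at h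
  by_cases h4 : s = "lounge"
  · rw [if_pos h4] at h; cases h; exact ⟨by decide, by decide, by decide⟩
  rw [if_neg h4] at h
  by_cases h5 : s = "bakery"
  · rw [if_pos h5] at h; cases h; exact ⟨by decide, by decide, by decide⟩
  rw [if_neg h5] at h
  by_cases h6 : s = "dessert_shop"
  · rw [if_pos h6] at h; cases h; exact ⟨by decide, by decide, by decide⟩
  rw [if_neg h6] at h
  by_cases h7 : s = "ice_cream_shop"
  · rw [if_pos h7] at h; cases h; exact ⟨by decide, by decide, by decide⟩
  rw [if_neg h7] at h
  by_cases h8 : s = "confectionery"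
  · rw [if_pos h8] at h; cases h; exact ⟨by decide, by decide, by decide⟩
  rw [if_neg h8] at h
  by_cases h9 : s = "cafe"
  · rw [if_pos h9] at h; cases h; exact ⟨by decide, by decide, by decide⟩
  rw [if_neg h9] at h
  by_cases h10 : s = "coffee_shop"
  · rw [if_pos h10] at h; cases h; exact ⟨by decide, by decide, by decide⟩
  rw [if_neg h10] at h
  by_cases h11 : s = "tea_house"
  · rw [if_pos h11] at h; cases h; exact ⟨by decide, by decide, by decide⟩
  rw [if_neg h11] at h
  by_cases h12 : s = "bubble_tea_store"
  · rw [if_pos h12] at h; cases h; exact ⟨by decide, by decide, by decide⟩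
  rw [if_neg h12] at h
  cases h

theorem rk_pos (t : String) : 1 ≤ rk t := by
  unfold rk
  cases h : PySem.Dict.get? pvPriority (PySem.Str.lower t) with
  | none => decide
  | some p => exact (lookup_char _ _ h).2.1

-- rk characterizations, one per priority level
theorem rk_eq_one_iff (t : String) : rk t = 1 ↔ PySem.Str.lower t = "lodging" := by
  unfold rk
  rw [get?_pvPriority]
  by_cases h0 : PySem.Str.lower t = "lodging"
  · rw [if_pos h0]; simp [h0]
  rw [if_neg h0]
  by_cases h1 : PySem.Str.lower t = "bar"
  · rw [if_pos h1]; simp [h1]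
  rw [if_neg h1]
  by_cases h2 : PySem.Str.lower t = "night_club"
  · rw [if_pos h2]; simp [h2]
  rw [if_neg h2]
  by_cases h3 : PySem.Str.lower t = "wine_bar"
  · rw [if_pos h3]; simp [h3]
  rw [if_neg h3]
  by_cases h4 : PySem.Str.lower t = "lounge"
  · rw [if_pos h4]; simp [h4]
  rw [if_neg h4]
  by_cases h5 : PySem.Str.lower t = "bakery"
  · rw [if_pos h5]; simp [h5]
  rw [if_neg h5]
  by_cases h6 : PySem.Str.lower t = "dessert_shop"
  · rw [if_pos h6]; simp [h6]
  rw [if_neg h6]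
  by_cases h7 : PySem.Str.lower t = "ice_cream_shop"
  · rw [if_pos h7]; simp [h7]
  rw [if_neg h7]
  by_cases h8 : PySem.Str.lower t = "confectionery"
  · rw [if_pos h8]; simp [h8]
  rw [if_neg h8]
  by_cases h9 : PySem.Str.lower t = "cafe"
  · rw [if_pos h9]; simp [h9]
  rw [if_neg h9]
  by_cases h10 : PySem.Str.lower t = "coffee_shop"
  · rw [if_pos h10]; simp [h10]
  rw [if_neg h10]
  by_cases h11 : PySem.Str.lower t = "tea_house"
  · rw [if_pos h11]; simp [h11]
  rw [if_neg h11]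
  by_cases h12 : PySem.Str.lower t = "bubble_tea_store"
  · rw [if_pos h12]; simp [h12]
  rw [if_neg h12]
  simp_all

theorem rk_eq_two_iff (t : String) : rk t = 2 ↔ PySem.Str.lower t ∈ (["bar", "night_club", "wine_bar", "lounge"] : List String) := by
  unfold rk
  rw [get?_pvPriority]
  by_cases h0 : PySem.Str.lower t = "lodging"
  · rw [if_pos h0]; simp [h0]
  rw [if_neg h0]
  by_cases h1 : PySem.Str.lower t = "bar"
  · rw [if_pos h1]; simp [h1]
  rw [if_neg h1]
  by_cases h2 : PySem.Str.lower t = "night_club"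
  · rw [if_pos h2]; simp [h2]
  rw [if_neg h2]
  by_cases h3 : PySem.Str.lower t = "wine_bar"
  · rw [if_pos h3]; simp [h3]
  rw [if_neg h3]
  by_cases h4 : PySem.Str.lower t = "lounge"
  · rw [if_pos h4]; simp [h4]
  rw [if_neg h4]
  by_cases h5 : PySem.Str.lower t = "bakery"
  · rw [if_pos h5]; simp [h5]
  rw [if_neg h5]
  by_cases h6 : PySem.Str.lower t = "dessert_shop"
  · rw [if_pos h6]; simp [h6]
  rw [if_neg h6]
  by_cases h7 : PySem.Str.lower t = "ice_cream_shop"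
  · rw [if_pos h7]; simp [h7]
  rw [if_neg h7]
  by_cases h8 : PySem.Str.lower t = "confectionery"
  · rw [if_pos h8]; simp [h8]
  rw [if_neg h8]
  by_cases h9 : PySem.Str.lower t = "cafe"
  · rw [if_pos h9]; simp [h9]
  rw [if_neg h9]
  by_cases h10 : PySem.Str.lower t = "coffee_shop"
  · rw [if_pos h10]; simp [h10]
  rw [if_neg h10]
  by_cases h11 : PySem.Str.lower t = "tea_house"
  · rw [if_pos h11]; simp [h11]
  rw [if_neg h11]
  by_cases h12 : PySem.Str.lower t = "bubble_tea_store"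
  · rw [if_pos h12]; simp [h12]
  rw [if_neg h12]
  simp_all

theorem rk_eq_three_iff (t : String) : rk t = 3 ↔ PySem.Str.lower t = "bakery" := by
  unfold rk
  rw [get?_pvPriority]
  by_cases h0 : PySem.Str.lower t = "lodging"
  · rw [if_pos h0]; simp [h0]
  rw [if_neg h0]
  by_cases h1 : PySem.Str.lower t = "bar"
  · rw [if_pos h1]; simp [h1]
  rw [if_neg h1]
  by_cases h2 : PySem.Str.lower t = "night_club"
  · rw [if_pos h2]; simp [h2]
  rw [if_neg h2]
  by_cases h3 : PySem.Str.lower t = "wine_bar"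
  · rw [if_pos h3]; simp [h3]
  rw [if_neg h3]
  by_cases h4 : PySem.Str.lower t = "lounge"
  · rw [if_pos h4]; simp [h4]
  rw [if_neg h4]
  by_cases h5 : PySem.Str.lower t = "bakery"
  · rw [if_pos h5]; simp [h5]
  rw [if_neg h5]
  by_cases h6 : PySem.Str.lower t = "dessert_shop"
  · rw [if_pos h6]; simp [h6]
  rw [if_neg h6]
  by_cases h7 : PySem.Str.lower t = "ice_cream_shop"
  · rw [if_pos h7]; simp [h7]
  rw [if_neg h7]
  by_cases h8 : PySem.Str.lower t = "confectionery"
  · rw [if_pos h8]; simp [h8]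
  rw [if_neg h8]
  by_cases h9 : PySem.Str.lower t = "cafe"
  · rw [if_pos h9]; simp [h9]
  rw [if_neg h9]
  by_cases h10 : PySem.Str.lower t = "coffee_shop"
  · rw [if_pos h10]; simp [h10]
  rw [if_neg h10]
  by_cases h11 : PySem.Str.lower t = "tea_house"
  · rw [if_pos h11]; simp [h11]
  rw [if_neg h11]
  by_cases h12 : PySem.Str.lower t = "bubble_tea_store"
  · rw [if_pos h12]; simp [h12]
  rw [if_neg h12]
  simp_all

theorem rk_eq_four_iff (t : String) : rk t = 4 ↔ PySem.Str.lower t ∈ (["dessert_shop", "ice_cream_shop", "confectionery"] : List String) := by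
  unfold rk
  rw [get?_pvPriority]
  by_cases h0 : PySem.Str.lower t = "lodging"
  · rw [if_pos h0]; simp [h0]
  rw [if_neg h0]
  by_cases h1 : PySem.Str.lower t = "bar"
  · rw [if_pos h1]; simp [h1]
  rw [if_neg h1]
  by_cases h2 : PySem.Str.lower t = "night_club"
  · rw [if_pos h2]; simp [h2]
  rw [if_neg h2]
  by_cases h3 : PySem.Str.lower t = "wine_bar"
  · rw [if_pos h3]; simp [h3]
  rw [if_neg h3]
  by_cases h4 : PySem.Str.lower t = "lounge"
  · rw [if_pos h4]; simp [h4]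
  rw [if_neg h4]
  by_cases h5 : PySem.Str.lower t = "bakery"
  · rw [if_pos h5]; simp [h5]
  rw [if_neg h5]
  by_cases h6 : PySem.Str.lower t = "dessert_shop"
  · rw [if_pos h6]; simp [h6]
  rw [if_neg h6]
  by_cases h7 : PySem.Str.lower t = "ice_cream_shop"
  · rw [if_pos h7]; simp [h7]
  rw [if_neg h7]
  by_cases h8 : PySem.Str.lower t = "confectionery"
  · rw [if_pos h8]; simp [h8]
  rw [if_neg h8]
  by_cases h9 : PySem.Str.lower t = "cafe"
  · rw [if_pos h9]; simp [h9]
  rw [if_neg h9]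
  by_cases h10 : PySem.Str.lower t = "coffee_shop"
  · rw [if_pos h10]; simp [h10]
  rw [if_neg h10]
  by_cases h11 : PySem.Str.lower t = "tea_house"
  · rw [if_pos h11]; simp [h11]
  rw [if_neg h11]
  by_cases h12 : PySem.Str.lower t = "bubble_tea_store"
  · rw [if_pos h12]; simp [h12]
  rw [if_neg h12]
  simp_all

theorem rk_eq_five_iff (t : String) : rk t = 5 ↔ PySem.Str.lower t ∈ (["cafe", "coffee_shop", "tea_house"] : List String) := by
  unfold rk
  rw [get?_pvPriority]
  by_cases h0 : PySem.Str.lower t = "lodging"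
  · rw [if_pos h0]; simp [h0]
  rw [if_neg h0]
  by_cases h1 : PySem.Str.lower t = "bar"
  · rw [if_pos h1]; simp [h1]
  rw [if_neg h1]
  by_cases h2 : PySem.Str.lower t = "night_club"
  · rw [if_pos h2]; simp [h2]
  rw [if_neg h2]
  by_cases h3 : PySem.Str.lower t = "wine_bar"
  · rw [if_pos h3]; simp [h3]
  rw [if_neg h3]
  by_cases h4 : PySem.Str.lower t = "lounge"
  · rw [if_pos h4]; simp [h4]
  rw [if_neg h4]
  by_cases h5 : PySem.Str.lower t = "bakery"
  · rw [if_pos h5]; simp [h5]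
  rw [if_neg h5]
  by_cases h6 : PySem.Str.lower t = "dessert_shop"
  · rw [if_pos h6]; simp [h6]
  rw [if_neg h6]
  by_cases h7 : PySem.Str.lower t = "ice_cream_shop"
  · rw [if_pos h7]; simp [h7]
  rw [if_neg h7]
  by_cases h8 : PySem.Str.lower t = "confectionery"
  · rw [if_pos h8]; simp [h8]
  rw [if_neg h8]
  by_cases h9 : PySem.Str.lower t = "cafe"
  · rw [if_pos h9]; simp [h9]
  rw [if_neg h9]
  by_cases h10 : PySem.Str.lower t = "coffee_shop"
  · rw [if_pos h10]; simp [h10]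
  rw [if_neg h10]
  by_cases h11 : PySem.Str.lower t = "tea_house"
  · rw [if_pos h11]; simp [h11]
  rw [if_neg h11]
  by_cases h12 : PySem.Str.lower t = "bubble_tea_store"
  · rw [if_pos h12]; simp [h12]
  rw [if_neg h12]
  simp_all

theorem rk_eq_six_iff (t : String) : rk t = 6 ↔ PySem.Str.lower t = "bubble_tea_store" := by
  unfold rk
  rw [get?_pvPriority]
  by_cases h0 : PySem.Str.lower t = "lodging"
  · rw [if_pos h0]; simp [h0]
  rw [if_neg h0]
  by_cases h1 : PySem.Str.lower t = "bar"
  · rw [if_pos h1]; simp [h1]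
  rw [if_neg h1]
  by_cases h2 : PySem.Str.lower t = "night_club"
  · rw [if_pos h2]; simp [h2]
  rw [if_neg h2]
  by_cases h3 : PySem.Str.lower t = "wine_bar"
  · rw [if_pos h3]; simp [h3]
  rw [if_neg h3]
  by_cases h4 : PySem.Str.lower t = "lounge"
  · rw [if_pos h4]; simp [h4]
  rw [if_neg h4]
  by_cases h5 : PySem.Str.lower t = "bakery"
  · rw [if_pos h5]; simp [h5]
  rw [if_neg h5]
  by_cases h6 : PySem.Str.lower t = "dessert_shop"
  · rw [if_pos h6]; simp [h6]
  rw [if_neg h6]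
  by_cases h7 : PySem.Str.lower t = "ice_cream_shop"
  · rw [if_pos h7]; simp [h7]
  rw [if_neg h7]
  by_cases h8 : PySem.Str.lower t = "confectionery"
  · rw [if_pos h8]; simp [h8]
  rw [if_neg h8]
  by_cases h9 : PySem.Str.lower t = "cafe"
  · rw [if_pos h9]; simp [h9]
  rw [if_neg h9]
  by_cases h10 : PySem.Str.lower t = "coffee_shop"
  · rw [if_pos h10]; simp [h10]
  rw [if_neg h10]
  by_cases h11 : PySem.Str.lower t = "tea_house"
  · rw [if_pos h11]; simp [h11]
  rw [if_neg h11]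
  by_cases h12 : PySem.Str.lower t = "bubble_tea_store"
  · rw [if_pos h12]; simp [h12]
  rw [if_neg h12]
  simp_all

-- mfold facts
theorem mfold_le_init (ts : List String) : ∀ a, mfold a ts ≤ a := by
  induction ts with
  | nil => intro a; exact Nat.le_refl a
  | cons t ts ih =>
    intro a
    exact Nat.le_trans (ih (min a (rk t))) (Nat.min_le_left _ _)

theorem mfold_le_mem (ts : List String) : ∀ a t, t ∈ ts → mfold a ts ≤ rk t := by
  induction ts with
  | nil => intro a t h; cases h
  | cons u ts ih =>
    intro a t h
    cases h with
    | head => exact Nat.le_trans (mfold_le_init ts _) (Nat.min_le_right _ _)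
    | tail _ h => exact ih _ t h

theorem mfold_cases (ts : List String) : ∀ a, mfold a ts = a ∨ ∃ t ∈ ts, rk t = mfold a ts := by
  induction ts with
  | nil => intro a; exact Or.inl rfl
  | cons u ts ih =>
    intro a
    rcases ih (min a (rk u)) with h | ⟨t, ht, h⟩
    · show mfold (min a (rk u)) ts = a ∨ _
      rcases Nat.le_total a (rk u) with hle | hle
      · rw [h, Nat.min_eq_left hle]; exact Or.inl rfl
      · right
        refine ⟨u, List.mem_cons_self, ?_⟩
        show rk u = mfold (min a (rk u)) ts
        rw [h, Nat.min_eq_right hle]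
    · exact Or.inr ⟨t, List.mem_cons_of_mem _ ht, h⟩

theorem mfold_pos (ts : List String) : ∀ a, 1 ≤ a → 1 ≤ mfold a ts := by
  induction ts with
  | nil => intro a h; exact h
  | cons t ts ih =>
    intro a h
    exact ih _ (le_min h (rk_pos t))

-- the B-side fold computes (minimal rank, its kind)
theorem b_fold (ts : List String) : ∀ (r : Nat), 1 ≤ r → r ≤ 7 →
    ts.foldl (fun best t =>
      if t ≠ "" then
        match PySem.Dict.get? pvPriority (PySem.Str.lower t) with
        | some p => if p.1 < best.1 then p else best
        | none => best
      else best) (r, kindOf r) = (mfold r ts, kindOf (mfold r ts)) := by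
  induction ts with
  | nil => intro r _ _; rfl
  | cons t ts ih =>
    intro r h1 h7
    have hstep : (if t ≠ "" then
        match PySem.Dict.get? pvPriority (PySem.Str.lower t) with
        | some p => if p.1 < (r, kindOf r).1 then p else (r, kindOf r)
        | none => (r, kindOf r)
      else (r, kindOf r)) = (min r (rk t), kindOf (min r (rk t))) := by
      by_cases ht : t = ""
      · subst ht
        have : rk "" = 7 := by decide
        simp [this, Nat.min_eq_left h7]
      · simp only [ht, ne_eq, not_false_eq_true, if_true]
        cases hg : PySem.Dict.get? pvPriority (PySem.Str.lower t) with
        | none =>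
          have : rk t = 7 := by unfold rk; rw [hg]
          simp [this, Nat.min_eq_left h7]
        | some p =>
          have hp : rk t = p.1 := by unfold rk; rw [hg]
          have hk := (lookup_char _ _ hg).1
          by_cases hlt : p.1 < r
          · simp only [hlt, if_true]
            rw [hp, Nat.min_eq_right (Nat.le_of_lt (hp ▸ hlt))]
            exact Prod.ext rfl hk
          · simp only [hlt, if_false]
            rw [hp, Nat.min_eq_left (Nat.le_of_not_lt (hp ▸ hlt))]
    show List.foldl _ _ (t :: ts) = _
    rw [List.foldl_cons, hstep,
      ih (min r (rk t)) (le_min h1 (rk_pos t)) (Nat.le_trans (Nat.min_le_left _ _) h7)]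
    rfl

-- A-side membership characterizations
theorem mem_lowered_iff (types : List String) (s : String) (hs : s ≠ "") :
    s ∈ (types.filter (fun x => x ≠ "")).map (fun x => PySem.Str.lower x) ↔
      ∃ t ∈ types, PySem.Str.lower t = s := by
  simp only [List.mem_map, List.mem_filter, decide_not, Bool.not_eq_eq_eq_not, Bool.not_true,
    decide_eq_false_iff_not]
  constructor
  · rintro ⟨t, ⟨ht, -⟩, rfl⟩; exact ⟨t, ht, rfl⟩
  · rintro ⟨t, ht, rfl⟩
    refine ⟨t, ⟨ht, ?_⟩, rfl⟩
    intro h; subst h; exact hs rfl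

theorem contains_tset_iff (types : List String) (s : String) (hs : s ≠ "") :
    PySem.Set.contains (PySem.Set.ofList ((types.filter (fun x => x ≠ "")).map (fun x => PySem.Str.lower x))) s = true ↔
      ∃ t ∈ types, PySem.Str.lower t = s := by
  rw [PySem.Set.contains_iff, PySem.Set.mem_ofList, mem_lowered_iff _ _ hs]

theorem inter_tset_iff (types : List String) (g : List String) (hg : g.Nodup) (hgs : ∀ s ∈ g, s ≠ "") :
    PySem.Set.inter (PySem.Set.ofList ((types.filter (fun x => x ≠ "")).map (fun x => PySem.Str.lower x))) (PySem.Set.ofList g) ≠ [] ↔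
      ∃ t ∈ types, PySem.Str.lower t ∈ g := by
  have hgl : PySem.Set.ofList g = g := PySem.Set.ofList_eq_self_of_nodup g hg
  rw [hgl]
  simp only [PySem.Set.inter]
  rw [ne_eq, List.filter_eq_nil_iff]
  push Not
  constructor
  · rintro ⟨s, hsmem, hsc⟩
    have hsg : s ∈ g := by
      rw [PySem.Set.contains_iff] at hsc; exact hsc
    rw [PySem.Set.mem_ofList, mem_lowered_iff _ _ (hgs s hsg)] at hsmem
    rcases hsmem with ⟨t, ht, rfl⟩
    exact ⟨t, ht, hsg⟩
  · rintro ⟨t, ht, htg⟩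
    refine ⟨PySem.Str.lower t, ?_, ?_⟩
    · rw [PySem.Set.mem_ofList, mem_lowered_iff _ _ (hgs _ htg)]
      exact ⟨t, ht, rfl⟩
    · rw [PySem.Set.contains_iff]; exact htg

-- main equality
theorem ports_eq (types : List String) (venue_name : String) :
    detect_venue_kind types venue_name = detect_venue_kind_alt types venue_name := by
  unfold detect_venue_kind detect_venue_kind_alt
  by_cases hb : (["boba", "bubble tea", "tapioca", "pearl milk"].any
      (fun k => PySem.Str.isIn k (PySem.Str.lower (if venue_name = "" then "" else venue_name)))) = true
  · simp only [hb, if_true]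
  · simp only [hb, Bool.false_eq_true, if_false]
    have hkind7 : kindOf 7 = "restaurant" := by decide
    rw [show ((7 : Nat), "restaurant") = ((7 : Nat), kindOf 7) from by decide,
      b_fold types 7 (by decide) (by decide)]
    set m := mfold 7 types with hm
    have hub : m ≤ 7 := mfold_le_init types 7
    have hlb : 1 ≤ m := mfold_pos types 7 (by decide)
    have hmem : ∀ t ∈ types, m ≤ rk t := fun t ht => mfold_le_mem types 7 t ht
    have hc : m = 7 ∨ ∃ t ∈ types, rk t = m := mfold_cases types 7
    -- the six conditions of A's chain, as existence of a type of that rank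
    have c1 : (PySem.Set.contains (PySem.Set.ofList ((types.filter (fun x => x ≠ "")).map (fun x => PySem.Str.lower x))) "lodging" = true) ↔ ∃ t ∈ types, rk t = 1 := by
      rw [contains_tset_iff _ _ (by decide)]
      exact exists_congr fun t => and_congr_right fun _ => (rk_eq_one_iff t).symm
    have c2 : (PySem.Set.inter (PySem.Set.ofList ((types.filter (fun x => x ≠ "")).map (fun x => PySem.Str.lower x))) (PySem.Set.ofList ["bar", "night_club", "wine_bar", "lounge"]) ≠ []) ↔ ∃ t ∈ types, rk t = 2 := by
      rw [inter_tset_iff _ _ (by decide) (by decide)]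
      exact exists_congr fun t => and_congr_right fun _ => (rk_eq_two_iff t).symm
    have c3 : (PySem.Set.contains (PySem.Set.ofList ((types.filter (fun x => x ≠ "")).map (fun x => PySem.Str.lower x))) "bakery" = true) ↔ ∃ t ∈ types, rk t = 3 := by
      rw [contains_tset_iff _ _ (by decide)]
      exact exists_congr fun t => and_congr_right fun _ => (rk_eq_three_iff t).symm
    have c4 : (PySem.Set.inter (PySem.Set.ofList ((types.filter (fun x => x ≠ "")).map (fun x => PySem.Str.lower x))) (PySem.Set.ofList ["dessert_shop", "ice_cream_shop", "confectionery"]) ≠ []) ↔ ∃ t ∈ types, rk t = 4 := by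
      rw [inter_tset_iff _ _ (by decide) (by decide)]
      exact exists_congr fun t => and_congr_right fun _ => (rk_eq_four_iff t).symm
    have c5 : (PySem.Set.inter (PySem.Set.ofList ((types.filter (fun x => x ≠ "")).map (fun x => PySem.Str.lower x))) (PySem.Set.ofList ["cafe", "coffee_shop", "tea_house"]) ≠ []) ↔ ∃ t ∈ types, rk t = 5 := by
      rw [inter_tset_iff _ _ (by decide) (by decide)]
      exact exists_congr fun t => and_congr_right fun _ => (rk_eq_five_iff t).symm
    have c6 : (PySem.Set.contains (PySem.Set.ofList ((types.filter (fun x => x ≠ "")).map (fun x => PySem.Str.lower x))) "bubble_tea_store" = true) ↔ ∃ t ∈ types, rk t = 6 := by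
      rw [contains_tset_iff _ _ (by decide)]
      exact exists_congr fun t => and_congr_right fun _ => (rk_eq_six_iff t).symm
    have no_below : ∀ i, i < m → ¬ ∃ t ∈ types, rk t = i := by
      rintro i hi ⟨t, ht, hrt⟩
      exact absurd (hmem t ht) (by omega)
    have at_m : m ≤ 6 → ∃ t ∈ types, rk t = m := by
      intro h6
      rcases hc with h | h
      · omega
      · rcases h with ⟨t, ht, h⟩; exact ⟨t, ht, h⟩
    interval_cases m
    · rw [if_pos (c1.mpr (at_m (by omega)))]; rfl
    · rw [if_neg (fun h => no_below 1 (by omega) (c1.mp h)),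
        if_pos (c2.mpr (at_m (by omega)))]; rfl
    · rw [if_neg (fun h => no_below 1 (by omega) (c1.mp h)),
        if_neg (fun h => no_below 2 (by omega) (c2.mp h)),
        if_pos (c3.mpr (at_m (by omega)))]; rfl
    · rw [if_neg (fun h => no_below 1 (by omega) (c1.mp h)),
        if_neg (fun h => no_below 2 (by omega) (c2.mp h)),
        if_neg (fun h => no_below 3 (by omega) (c3.mp h)),
        if_pos (c4.mpr (at_m (by omega)))]; rfl
    · rw [if_neg (fun h => no_below 1 (by omega) (c1.mp h)),
        if_neg (fun h => no_below 2 (by omega) (c2.mp h)),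
        if_neg (fun h => no_below 3 (by omega) (c3.mp h)),
        if_neg (fun h => no_below 4 (by omega) (c4.mp h)),
        if_pos (c5.mpr (at_m (by omega)))]; rfl
    · rw [if_neg (fun h => no_below 1 (by omega) (c1.mp h)),
        if_neg (fun h => no_below 2 (by omega) (c2.mp h)),
        if_neg (fun h => no_below 3 (by omega) (c3.mp h)),
        if_neg (fun h => no_below 4 (by omega) (c4.mp h)),
        if_neg (fun h => no_below 5 (by omega) (c5.mp h)),
        if_pos (c6.mpr (at_m (by omega)))]; rfl
    · rw [if_neg (fun h => no_below 1 (by omega) (c1.mp h)),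
        if_neg (fun h => no_below 2 (by omega) (c2.mp h)),
        if_neg (fun h => no_below 3 (by omega) (c3.mp h)),
        if_neg (fun h => no_below 4 (by omega) (c4.mp h)),
        if_neg (fun h => no_below 5 (by omega) (c5.mp h)),
        if_neg (fun h => no_below 6 (by omega) (c6.mp h))]
      rw [ite_self]
      rfl

-- ===== VERDICT (by name: the statement is the Claim_ definition above) =====
theorem detect_venue_kind_spec : Claim_equal_detect_venue_kind := by
  intro types venue_name _
  show _ = _
  exact ports_eq types venue_name
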